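-- pv_equiv track=rewrite | github.com/Ace1928/eidosian_forge | projects/falling_sand/src/falling_sand/engine/tools.py | _iter_sphere
-- ===== SOURCE A (Python) =====
-- from typing import Iterable, Tuple
--
-- VoxelCoord = Tuple[int, int, int]
--
-- def _iter_sphere(center: VoxelCoord, radius: int) -> Iterable[VoxelCoord]:
--     cx, cy, cz = center
--     r2 = radius * radius
--     for dx in range(-radius, radius + 1):
--         for dy in range(-radius, radius + 1):
--             for dz in range(-radius, radius + 1):
--                 if dx * dx + dy * dy + dz * dz <= r2:
--                     yield (cx + dx, cy + dy, cz + dz)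
-- ===== SOURCE B (Python) =====
-- import math
-- from typing import Iterable, Tuple
--
-- VoxelCoord = Tuple[int, int, int]
--
-- def _slab(r2: int, d: int):
--     """Relative (dy, dz) offsets of the disc at |dx| = d, via exact integer isqrt bounds."""
--     ry2 = r2 - d * d
--     if ry2 < 0:
--         return []
--     ylim = math.isqrt(ry2)
--     return [(dy, dz)
--             for dy in range(-ylim, ylim + 1)
--             if (zlim := math.isqrt(ry2 - dy * dy)) >= 0
--             for dz in range(-zlim, zlim + 1)]
--
-- def _iter_sphere(center: VoxelCoord, radius: int) -> Iterable[VoxelCoord]: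
--     cx, cy, cz = center
--     r2 = radius * radius
--     # by mirror symmetry the (dy, dz) disc depends only on |dx|: compute each disc once
--     slabs = [_slab(r2, d) for d in range(radius + 1)]
--     for dx in range(-radius, radius + 1):
--         for dy, dz in slabs[abs(dx)]:
--             yield (cx + dx, cy + dy, cz + dz)
-- ===== Notes on version B (the rewrite author's own statement) =====
-- stated objective: alternative
-- what changed: B precomputes each |dx|-disc of relative (dy,dz) offsets once (exact integer bounds via math.isqrt, no per-cell distance test) and replays it for both mirrored dx slabs, instead of scanning the full (2r+1)^3 cube with a distance check per cell.
import Mathlib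
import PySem

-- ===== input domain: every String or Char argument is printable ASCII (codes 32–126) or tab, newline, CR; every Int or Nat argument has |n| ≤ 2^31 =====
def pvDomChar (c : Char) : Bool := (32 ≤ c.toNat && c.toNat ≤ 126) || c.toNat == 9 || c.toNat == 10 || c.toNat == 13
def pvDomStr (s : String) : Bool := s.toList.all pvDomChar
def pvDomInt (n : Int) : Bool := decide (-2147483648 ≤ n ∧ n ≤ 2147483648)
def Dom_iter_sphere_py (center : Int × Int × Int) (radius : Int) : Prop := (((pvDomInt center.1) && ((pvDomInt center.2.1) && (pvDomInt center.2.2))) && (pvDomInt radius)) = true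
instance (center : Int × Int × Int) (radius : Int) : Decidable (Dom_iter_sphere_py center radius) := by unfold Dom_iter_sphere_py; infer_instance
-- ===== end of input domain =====

-- B precomputes each |dx|-disc of relative (dy,dz) offsets once (exact integer isqrt bounds,
-- no per-cell distance test) and replays it for both mirrored dx slabs, instead of A's full
-- cube scan with a distance check per cell (objective: alternative algorithm).
-- The Python A is a generator; equivalence is about the sequence of yielded triples.

-- ===== PORT A =====
def iter_sphere_py (center : Int × Int × Int) (radius : Int) : List (Int × Int × Int) :=
  let cx := center.1
  let cy := center.2.1
  let cz := center.2.2
  let r2 := radius * radius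
  (PySem.List.pyRange (-radius) (radius + 1) 1).flatMap fun dx =>
    (PySem.List.pyRange (-radius) (radius + 1) 1).flatMap fun dy =>
      (PySem.List.pyRange (-radius) (radius + 1) 1).flatMap fun dz =>
        if dx * dx + dy * dy + dz * dz ≤ r2 then [(cx + dx, cy + dy, cz + dz)] else []

-- ===== PORT B =====
-- relative (dy, dz) offsets of the disc at |dx| = d (math.isqrt = Nat.sqrt on toNat)
def pvSlab (r2 d : Int) : List (Int × Int) :=
  let ry2 := r2 - d * d
  if 0 ≤ ry2 then
    let ylim : Int := (Nat.sqrt ry2.toNat : Nat)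
    (PySem.List.pyRange (-ylim) (ylim + 1) 1).flatMap fun dy =>
      let zlim : Int := (Nat.sqrt (ry2 - dy * dy).toNat : Nat)
      (PySem.List.pyRange (-zlim) (zlim + 1) 1).map fun dz => (dy, dz)
  else []

def iter_sphere_py_alt (center : Int × Int × Int) (radius : Int) : List (Int × Int × Int) :=
  let cx := center.1
  let cy := center.2.1
  let cz := center.2.2
  let r2 := radius * radius
  let slabs := (PySem.List.pyRange 0 (radius + 1) 1).map fun d => pvSlab r2 d
  (PySem.List.pyRange (-radius) (radius + 1) 1).flatMap fun dx =>
    (PySem.List.pyGetD slabs (dx.natAbs : Int) []).map fun p =>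
      (cx + dx, cy + p.1, cz + p.2)

-- ===== PRECONDITION & SPEC =====
def Spec_iter_sphere_py (center : Int × Int × Int) (radius : Int) (out : List (Int × Int × Int)) : Prop := out = iter_sphere_py_alt center radius
instance (center : Int × Int × Int) (radius : Int) (out : List (Int × Int × Int)) : Decidable (Spec_iter_sphere_py center radius out) := by unfold Spec_iter_sphere_py; infer_instance

-- ===== CLAIM (what is proved, stated in full; the proofs are below) =====
def Claim_equal_iter_sphere_py : Prop := ∀ (center : Int × Int × Int) (radius : Int), Dom_iter_sphere_py center radius → Spec_iter_sphere_py center radius (iter_sphere_py center radius)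

-- ===== LEMMAS AND PROOFS =====

-- t*t ≤ m (m ≥ 0) exactly when |t| is at most the integer square root of m.
theorem pv_sq_le_iff (m t : Int) (hm : 0 ≤ m) :
    t * t ≤ m ↔ -(Nat.sqrt m.toNat : Int) ≤ t ∧ t ≤ (Nat.sqrt m.toNat : Int) := by
  have habs : (t.natAbs : Int) * (t.natAbs : Int) = t * t := Int.natAbs_mul_self
  constructor
  · intro h
    have h1 : t.natAbs * t.natAbs ≤ m.toNat := by
      have := habs ▸ h
      omega
    have h2 : t.natAbs ≤ Nat.sqrt m.toNat := Nat.le_sqrt'.mpr (by simpa [pow_two] using h1)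
    omega
  · intro ⟨h1, h2⟩
    have h3 : t.natAbs ≤ Nat.sqrt m.toNat := by omega
    have h4 : t.natAbs * t.natAbs ≤ m.toNat :=
      le_trans (Nat.mul_le_mul h3 h3) (by simpa [pow_two] using Nat.sqrt_le' m.toNat)
    have : (t.natAbs : Int) * (t.natAbs : Int) ≤ (m.toNat : Int) := by exact_mod_cast h4
    omega

-- Filtering a symmetric range by t*t ≤ m is the same as ranging over ±isqrt m.
theorem pv_range_filter_sq {α : Type} (f : Int → List α) (m r : Int) (hm : 0 ≤ m)
    (hr : (Nat.sqrt m.toNat : Int) ≤ r) :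
    ((PySem.List.pyRange (-r) (r + 1) 1).flatMap fun t => if t * t ≤ m then f t else [])
      = (PySem.List.pyRange (-(Nat.sqrt m.toNat : Int)) ((Nat.sqrt m.toNat : Int) + 1) 1).flatMap f := by
  set s : Int := (Nat.sqrt m.toNat : Int) with hs
  have hs0 : 0 ≤ s := by positivity
  have h1 : PySem.List.pyRange (-r) (r + 1) 1
      = PySem.List.pyRange (-r) (-s) 1 ++ PySem.List.pyRange (-s) (r + 1) 1 :=
    PySem.List.pyRange_one_append _ _ _ (by omega) (by omega)
  have h2 : PySem.List.pyRange (-s) (r + 1) 1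
      = PySem.List.pyRange (-s) (s + 1) 1 ++ PySem.List.pyRange (s + 1) (r + 1) 1 :=
    PySem.List.pyRange_one_append _ _ _ (by omega) (by omega)
  rw [h1, h2, List.flatMap_append, List.flatMap_append]
  have hleft : ((PySem.List.pyRange (-r) (-s) 1).flatMap fun t => if t * t ≤ m then f t else []) = [] := by
    refine List.flatMap_eq_nil_iff.mpr ?_
    intro t ht
    rw [PySem.List.mem_pyRange_one] at ht
    have : ¬ t * t ≤ m := by
      rw [pv_sq_le_iff m t hm]; omega
    simp [this]
  have hright : ((PySem.List.pyRange (s + 1) (r + 1) 1).flatMap fun t => if t * t ≤ m then f t else []) = [] := by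
    refine List.flatMap_eq_nil_iff.mpr ?_
    intro t ht
    rw [PySem.List.mem_pyRange_one] at ht
    have : ¬ t * t ≤ m := by
      rw [pv_sq_le_iff m t hm]; omega
    simp [this]
  have hmid : ((PySem.List.pyRange (-s) (s + 1) 1).flatMap fun t => if t * t ≤ m then f t else [])
      = (PySem.List.pyRange (-s) (s + 1) 1).flatMap f := by
    refine List.flatMap_congr ?_
    intro t ht
    rw [PySem.List.mem_pyRange_one] at ht
    have : t * t ≤ m := by rw [pv_sq_le_iff m t hm]; omega
    simp [this]
  rw [hleft, hright, hmid]
  simp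

-- A's inner double loop at a fixed dx is the translated slab at |dx|.
theorem pv_inner_eq_slab (cx cy cz radius dx : Int)
    (hdx : -radius ≤ dx ∧ dx < radius + 1) :
    ((PySem.List.pyRange (-radius) (radius + 1) 1).flatMap fun dy =>
      (PySem.List.pyRange (-radius) (radius + 1) 1).flatMap fun dz =>
        if dx * dx + dy * dy + dz * dz ≤ radius * radius then [(cx + dx, cy + dy, cz + dz)] else [])
      = (pvSlab (radius * radius) (dx.natAbs : Int)).map fun p => (cx + dx, cy + p.1, cz + p.2) := by
  have hr0 : 0 ≤ radius := by omega
  have hdx2 : dx * dx ≤ radius * radius := by nlinarith [hdx.1, hdx.2]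
  have hry2 : 0 ≤ radius * radius - dx * dx := by omega
  have hnn : ((dx.natAbs : Int)) * ((dx.natAbs : Int)) = dx * dx := Int.natAbs_mul_self
  have hsq_r : (Nat.sqrt (radius * radius).toNat : Int) = radius := by
    have h1 : (radius * radius).toNat = radius.toNat * radius.toNat := by
      rw [Int.toNat_mul hr0 hr0]
    rw [h1, ← pow_two, Nat.sqrt_eq', Int.toNat_of_nonneg hr0]
  have hsqle : ∀ m : Int, m ≤ radius * radius → (Nat.sqrt m.toNat : Int) ≤ radius := by
    intro m hmle
    have h2 : Nat.sqrt m.toNat ≤ Nat.sqrt (radius * radius).toNat :=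
      Nat.sqrt_le_sqrt (by omega)
    calc (Nat.sqrt m.toNat : Int) ≤ (Nat.sqrt (radius * radius).toNat : Int) := by exact_mod_cast h2
      _ = radius := hsq_r
  unfold pvSlab
  simp only [hnn]
  rw [if_pos hry2]
  rw [List.map_flatMap]
  have hbody : ∀ dy : Int,
      ((PySem.List.pyRange (-radius) (radius + 1) 1).flatMap fun dz =>
        if dx * dx + dy * dy + dz * dz ≤ radius * radius then [(cx + dx, cy + dy, cz + dz)] else [])
      = (if dy * dy ≤ radius * radius - dx * dx then
          (PySem.List.pyRange (-(Nat.sqrt (radius * radius - dx * dx - dy * dy).toNat : Int))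
            ((Nat.sqrt (radius * radius - dx * dx - dy * dy).toNat : Int) + 1) 1).map
            (fun dz => (cx + dx, cy + dy, cz + dz))
         else []) := by
    intro dy
    by_cases h : dy * dy ≤ radius * radius - dx * dx
    · rw [if_pos h]
      have hfun : (fun dz => if dx * dx + dy * dy + dz * dz ≤ radius * radius then [(cx + dx, cy + dy, cz + dz)] else [])
          = (fun dz : Int => if dz * dz ≤ radius * radius - dx * dx - dy * dy then [(cx + dx, cy + dy, cz + dz)] else []) := by
        funext dz
        exact if_congr (by omega) rfl rfl
      rw [hfun, pv_range_filter_sq _ _ radius (by omega) (hsqle _ (by nlinarith))]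
      exact Eq.symm List.map_eq_flatMap
    · rw [if_neg h]
      refine List.flatMap_eq_nil_iff.mpr ?_
      intro dz _
      have hdz : 0 ≤ dz * dz := mul_self_nonneg dz
      have : ¬ (dx * dx + dy * dy + dz * dz ≤ radius * radius) := by omega
      simp [this]
  calc ((PySem.List.pyRange (-radius) (radius + 1) 1).flatMap fun dy =>
        (PySem.List.pyRange (-radius) (radius + 1) 1).flatMap fun dz =>
          if dx * dx + dy * dy + dz * dz ≤ radius * radius then [(cx + dx, cy + dy, cz + dz)] else [])
      = ((PySem.List.pyRange (-radius) (radius + 1) 1).flatMap fun dy =>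
          if dy * dy ≤ radius * radius - dx * dx then
            (PySem.List.pyRange (-(Nat.sqrt (radius * radius - dx * dx - dy * dy).toNat : Int))
              ((Nat.sqrt (radius * radius - dx * dx - dy * dy).toNat : Int) + 1) 1).map
              (fun dz => (cx + dx, cy + dy, cz + dz))
          else []) := by
        exact List.flatMap_congr (fun dy _ => hbody dy)
    _ = _ := by
        rw [pv_range_filter_sq _ _ radius hry2 (hsqle _ (by nlinarith [mul_self_nonneg dx]))]
        refine List.flatMap_congr ?_
        intro dy _
        rw [List.map_map]
        exact List.map_congr_left fun dz _ => rfl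

-- ===== VERDICT (by name: the statement is the Claim_ definition above) =====
theorem iter_sphere_py_spec : Claim_equal_iter_sphere_py := by
  intro center radius _
  unfold Spec_iter_sphere_py iter_sphere_py iter_sphere_py_alt
  obtain ⟨cx, cy, cz⟩ := center
  simp only
  refine List.flatMap_congr ?_
  intro dx hdx
  rw [PySem.List.mem_pyRange_one] at hdx
  have hlook : PySem.List.pyGetD
      ((PySem.List.pyRange 0 (radius + 1) 1).map fun d => pvSlab (radius * radius) d)
      ((dx.natAbs : Int)) []
      = pvSlab (radius * radius) ((dx.natAbs : Int)) := by
    exact PySem.List.pyGetD_map_pyRange_of_nonneg _ _ _ _ (by positivity) (by omega)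
  rw [hlook]
  exact pv_inner_eq_slab cx cy cz radius dx hdx
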